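-- pv_equiv track=rewrite | github.com/pypi-data/pypi-mirror-336 | packages/oligopoolio/oligopoolio-0.0.3-py3-none-any.whl/oligopoolio/primers.py | clean_aa_seq
-- ===== SOURCE A (Python) =====
-- def clean_aa_seq(seq, allow_gaps=True, remove=False, replace='N', amino_acids=None):
--     """
--         Remove any non-canonical bases and swap them with N. amino_acids can be
--         specified if the user wants non-canonical amino acid bases.
--     """
--     if allow_gaps:
--         bases = amino_acids or list('ACDEFGHIKLMNPQRSTVWY-')  # Allow gaps
--     else:
--         bases = amino_acids or list('ACDEFGHIKLMNPQRSTVWY')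
--     seq = seq.strip().replace(' ', '')  # Remove any spaces
--     if remove:
--         replace = ''  # Swap the other base of N for -
--     return ''.join([s if s in bases else replace for s in seq])
-- ===== SOURCE B (Python) =====
-- def clean_aa_seq(seq, allow_gaps=True, remove=False, replace='N', amino_acids=None):
--     if allow_gaps:
--         bases = amino_acids or list('ACDEFGHIKLMNPQRSTVWY-')
--     else:
--         bases = amino_acids or list('ACDEFGHIKLMNPQRSTVWY')
--     seq = seq.strip().replace(' ', '')
--     if remove:
--         replace = ''
--     # two-pointer run segmentation: slice out maximal runs of allowed chars
--     # verbatim, emit replace*(run length) for maximal runs of bad chars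
--     out = []
--     i, n = 0, len(seq)
--     while i < n:
--         good = seq[i] in bases
--         j = i
--         while j < n and (seq[j] in bases) == good:
--             j += 1
--         out.append(seq[i:j] if good else replace * (j - i))
--         i = j
--     return ''.join(out)
-- ===== Notes on version B (the rewrite author's own statement) =====
-- stated objective: alternative
-- what changed: A maps every character individually inside one join comprehension; B scans the string with two pointers cutting it into maximal runs of allowed/disallowed characters, copying good runs as whole slices and emitting replace*(run length) for bad runs, then joins the run list.
import Mathlib
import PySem

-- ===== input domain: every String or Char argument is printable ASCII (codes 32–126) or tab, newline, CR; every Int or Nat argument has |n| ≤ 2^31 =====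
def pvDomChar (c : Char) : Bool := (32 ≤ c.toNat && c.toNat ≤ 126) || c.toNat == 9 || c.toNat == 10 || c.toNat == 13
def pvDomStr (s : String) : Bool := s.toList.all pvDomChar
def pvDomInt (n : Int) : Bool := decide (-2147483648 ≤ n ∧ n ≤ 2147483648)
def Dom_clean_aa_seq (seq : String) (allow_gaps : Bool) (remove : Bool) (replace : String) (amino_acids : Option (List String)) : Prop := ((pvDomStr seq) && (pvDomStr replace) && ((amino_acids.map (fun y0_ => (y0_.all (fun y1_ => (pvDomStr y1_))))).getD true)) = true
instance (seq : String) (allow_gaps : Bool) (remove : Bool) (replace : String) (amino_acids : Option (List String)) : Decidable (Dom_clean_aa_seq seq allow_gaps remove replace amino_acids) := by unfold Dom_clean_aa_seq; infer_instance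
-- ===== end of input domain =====

-- B replaces A's per-character join comprehension by a two-pointer run segmentation
-- (maximal allowed runs copied as slices, bad runs emitted as replace*(run length));
-- the return value is identical (alternative decomposition, not faster).

-- ===== PORT A =====
-- `amino_acids or list(...)`: Python `or` falls back when amino_acids is None or the empty list
def pvBases (allow_gaps : Bool) (amino_acids : Option (List String)) : List String :=
  let dflt : List String :=
    if allow_gaps then "ACDEFGHIKLMNPQRSTVWY-".toList.map (fun c => String.singleton c)
    else "ACDEFGHIKLMNPQRSTVWY".toList.map (fun c => String.singleton c)
  match amino_acids with
  | none => dflt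
  | some l => if l = [] then dflt else l

def clean_aa_seq (seq : String) (allow_gaps : Bool) (remove : Bool) (replace : String) (amino_acids : Option (List String)) : String :=
  let bases := pvBases allow_gaps amino_acids
  let s := PySem.Str.replace (PySem.Str.strip seq) " " ""
  let rep := if remove then "" else replace
  PySem.Str.join "" (s.toList.map (fun c => if bases.contains (String.singleton c) then String.singleton c else rep))

-- ===== PORT B =====
-- the outer while loop of Source B: cut off one maximal run (the inner `while j < n and
-- (seq[j] in bases) == good: j += 1` is the takeWhile/dropWhile split) and recurse on the rest
def pvRuns (good : Char → Bool) (rep : String) : List Char → List String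
  | [] => []
  | c :: rest =>
    let g := good c
    let run := rest.takeWhile (fun x => good x == g)
    let rest' := rest.dropWhile (fun x => good x == g)
    -- `seq[i:j] if good else replace * (j - i)`
    (if g then String.ofList (c :: run)
     else PySem.Str.join "" (List.replicate (run.length + 1) rep)) :: pvRuns good rep rest'
termination_by l => l.length
decreasing_by
  simpa using Nat.lt_succ_of_le (List.length_dropWhile_le _ rest)

def clean_aa_seq_alt (seq : String) (allow_gaps : Bool) (remove : Bool) (replace : String) (amino_acids : Option (List String)) : String :=
  let bases := pvBases allow_gaps amino_acids
  let s := PySem.Str.replace (PySem.Str.strip seq) " " ""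
  let rep := if remove then "" else replace
  PySem.Str.join "" (pvRuns (fun c => bases.contains (String.singleton c)) rep s.toList)

-- ===== PRECONDITION & SPEC =====
def Spec_clean_aa_seq (seq : String) (allow_gaps : Bool) (remove : Bool) (replace : String) (amino_acids : Option (List String)) (out : String) : Prop := out = clean_aa_seq_alt seq allow_gaps remove replace amino_acids
instance (seq : String) (allow_gaps : Bool) (remove : Bool) (replace : String) (amino_acids : Option (List String)) (out : String) : Decidable (Spec_clean_aa_seq seq allow_gaps remove replace amino_acids out) := by unfold Spec_clean_aa_seq; infer_instance

-- ===== CLAIM (what is proved, stated in full; the proofs are below) =====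
def Claim_equal_clean_aa_seq : Prop := ∀ (seq : String) (allow_gaps : Bool) (remove : Bool) (replace : String) (amino_acids : Option (List String)), Dom_clean_aa_seq seq allow_gaps remove replace amino_acids → Spec_clean_aa_seq seq allow_gaps remove replace amino_acids (clean_aa_seq seq allow_gaps remove replace amino_acids)

-- ===== LEMMAS AND PROOFS =====

theorem pv_join_nil_flatten (ps : List (List Char)) :
    PySem.Chars.join [] ps = ps.flatten := by
  induction ps with
  | nil => simp [PySem.Chars.join_nil]
  | cons p q ih =>
    cases q with
    | nil => simp [PySem.Chars.join_singleton]
    | cons r t => simp [PySem.Chars.join_cons_cons] at ih ⊢; simp [ih]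

-- the run list of B flattens to the per-character image A flattens to
theorem pv_flatten_singletons (run : List Char) :
    (run.map (fun c => [c])).flatten = run := by
  induction run with
  | nil => rfl
  | cons a t ih => simp only [List.map_cons, List.flatten_cons, ih]; rfl

theorem pv_runs_flatten (good : Char → Bool) (rep : String) (l : List Char) :
    ((pvRuns good rep l).map String.toList).flatten
      = (l.map (fun c => if good c then [c] else rep.toList)).flatten := by
  fun_induction pvRuns good rep l with
  | case1 => simp
  | case2 c rest g run rest' ih =>
    simp only [List.map_cons, List.flatten_cons, ih]
    have hsplit : rest = run ++ rest' := (List.takeWhile_append_dropWhile).symm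
    conv_rhs => rw [hsplit]
    simp only [List.map_cons, List.map_append, List.flatten_cons, List.flatten_append]
    have hrun : ∀ x ∈ run, good x = g := by
      intro x hx
      simpa using List.mem_takeWhile_imp hx
    by_cases hg : g = true
    · rw [if_pos hg]
      have hfc : (if good c = true then [c] else rep.toList) = [c] := if_pos hg
      have hmap : run.map (fun c => if good c = true then [c] else rep.toList)
          = run.map (fun c => [c]) := by
        apply List.map_congr_left
        intro x hx
        rw [if_pos (by rw [hrun x hx]; exact hg)]
      rw [hfc, hmap]
      simp [pv_flatten_singletons]
    · rw [if_neg hg]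
      have hfc : (if good c = true then [c] else rep.toList) = rep.toList := if_neg hg
      have hmap : run.map (fun c => if good c = true then [c] else rep.toList)
          = List.replicate run.length rep.toList := by
        rw [show run.length
            = (run.map (fun c => if good c = true then [c] else rep.toList)).length by
          simp]
        apply List.eq_replicate_of_mem
        intro x hx
        rcases List.mem_map.mp hx with ⟨y, hy, hxy⟩
        rw [← hxy, if_neg (by rw [hrun y hy]; exact hg)]
      rw [hfc, hmap]
      rw [PySem.Str.toList_join]
      rw [show ("" : String).toList = [] from rfl, pv_join_nil_flatten]
      simp [List.map_replicate, List.replicate_succ]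

-- the per-character image (A) and the run list (B) join to the same string
theorem pv_core (good : Char → Bool) (rep : String) (l : List Char) :
    PySem.Str.join "" (l.map (fun c => if good c then String.singleton c else rep))
      = PySem.Str.join "" (pvRuns good rep l) := by
  rw [← String.toList_inj]
  simp only [PySem.Str.toList_join]
  rw [show ("" : String).toList = [] from rfl, pv_join_nil_flatten,
    pv_join_nil_flatten, pv_runs_flatten, List.map_map]
  congr 1
  apply List.map_congr_left
  intro c _
  by_cases hb : good c = true
  · simp [hb, String.singleton]
  · simp [hb]

-- ===== VERDICT (by name: the statement is the Claim_ definition above) =====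
theorem clean_aa_seq_spec : Claim_equal_clean_aa_seq := by
  intro seq allow_gaps remove replace amino_acids _
  unfold Spec_clean_aa_seq clean_aa_seq clean_aa_seq_alt
  exact pv_core _ _ _
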